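-- pv_equiv track=rewrite | github.com/yesjjin99/Python-study | 김선영/그래프/가장먼노드.py | bfs
-- ===== SOURCE A (Python) =====
-- from collections import deque, defaultdict
--
-- def bfs(graph, start, visited, distance):
--     queue = deque([[start, 0]])
--     visited[start] = True
--
--     while queue:
--         node, depth = queue.popleft()
--         distance[node] = depth
--
--         for i in graph[node]:
--             if not visited[i]:
--                 queue.append([i, depth + 1])
--                 visited[i] = True
--         depth += 1
--
--     return distance.count(max(distance))
-- ===== SOURCE B (Python) =====
-- def bfs(graph, start, visited, distance):
--     # Phase 1: pure level-by-level traversal recording the BFS levels (no distance writes yet)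
--     visited[start] = True
--     levels = []
--     frontier = [start]
--     while frontier:
--         levels.append(frontier)
--         nxt = []
--         for node in frontier:
--             for i in graph[node]:
--                 if not visited[i]:
--                     visited[i] = True
--                     nxt.append(i)
--         frontier = nxt
--     # Phase 2: replay the distance writes level by level, then count
--     for depth, level in enumerate(levels):
--         for node in level:
--             distance[node] = depth
--     return distance.count(max(distance))
-- ===== Notes on version B (the rewrite author's own statement) =====
-- stated objective: alternative
-- what changed: Replaces the deque of (node,depth) pairs interleaving traversal and distance writes by a two-phase algorithm: phase 1 is a level-synchronous frontier traversal that only marks visited and records the list of BFS levels, phase 2 replays all distance writes level by level from that record, then counts.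
import Mathlib
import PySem

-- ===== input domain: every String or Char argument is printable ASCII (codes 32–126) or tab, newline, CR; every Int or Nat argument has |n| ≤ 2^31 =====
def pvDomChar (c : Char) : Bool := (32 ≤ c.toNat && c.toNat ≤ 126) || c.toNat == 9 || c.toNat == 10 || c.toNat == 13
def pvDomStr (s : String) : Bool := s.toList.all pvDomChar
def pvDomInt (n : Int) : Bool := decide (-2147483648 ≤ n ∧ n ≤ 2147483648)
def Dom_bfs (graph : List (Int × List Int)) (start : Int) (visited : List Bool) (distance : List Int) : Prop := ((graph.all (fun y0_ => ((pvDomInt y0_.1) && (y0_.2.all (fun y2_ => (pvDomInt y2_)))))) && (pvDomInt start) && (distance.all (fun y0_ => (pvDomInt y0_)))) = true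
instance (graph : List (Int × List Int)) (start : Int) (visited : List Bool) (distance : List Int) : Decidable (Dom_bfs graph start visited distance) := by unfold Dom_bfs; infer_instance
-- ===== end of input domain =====

-- B replaces A's deque of (node, depth) pairs by a two-phase algorithm: a pure level-synchronous
-- traversal recording the BFS levels, then a separate replay pass doing all distance writes; both
-- versions mutate visited/distance in place to the same final state, and the theorems below are
-- about the return value.

-- ===== PORT A =====
-- inner 'for i in graph[node]' loop of A: state = (queue, visited); appends (i, depth + 1) to the queue
def bfsInnerA (depth : Int) : List Int → List (Int × Int) → List Bool → Option (List (Int × Int) × List Bool)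
  | [], queue, visited => some (queue, visited)
  | i :: rest, queue, visited =>
    match PySem.List.pyGet? visited i with
    | none => none
    | some b =>
      if b then bfsInnerA depth rest queue visited
      else
        match PySem.List.pySet? visited i true with
        | none => none
        | some v' => bfsInnerA depth rest (queue ++ [(i, depth + 1)]) v'

-- 'while queue' loop of A; none = a Python raise (IndexError/KeyError); the fuel only guards totality
-- and is proved irrelevant at the chosen size (lemma loopA_fuel below)
def bfsLoopA (graph : List (Int × List Int)) : Nat → List (Int × Int) → List Bool → List Int → Option (List Bool × List Int)
  | 0, _, _, _ => none
  | _ + 1, [], visited, distance => some (visited, distance)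
  | fuel + 1, (node, depth) :: rest, visited, distance =>
    match PySem.List.pySet? distance node depth with
    | none => none
    | some distance' =>
      match graph.lookup node with
      | none => none
      | some adj =>
        match bfsInnerA depth adj rest visited with
        | none => none
        | some (queue', visited') => bfsLoopA graph fuel queue' visited' distance'

def bfs (graph : List (Int × List Int)) (start : Int) (visited : List Bool) (distance : List Int) : Int :=
  match PySem.List.pySet? visited start true with
  | none => 0
  | some v0 =>
    match bfsLoopA graph (4 * visited.length + 4) [(start, 0)] v0 distance with
    | none => 0
    | some (_, dist) =>
      match PySem.List.max? dist (fun x => x) with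
      | none => 0
      | some m => PySem.List.count dist m

-- ===== PORT B =====
-- phase 1, inner neighbour loop: collects unvisited neighbours into the next frontier
def collectInner : List Int → List Int → List Bool → Option (List Int × List Bool)
  | [], nxt, v => some (nxt, v)
  | i :: rest, nxt, v =>
    (PySem.List.pyGet? v i).bind fun b =>
      if b then collectInner rest nxt v
      else (PySem.List.pySet? v i true).bind fun v' => collectInner rest (nxt ++ [i]) v'

-- phase 1, the 'while frontier' / 'for node in frontier' loops: consumes the current frontier
-- node by node and, on a level transition, emits the completed next frontier as a recorded level;
-- distance is untouched here; fuel as in bfsLoopA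
def collectLoop (graph : List (Int × List Int)) : Nat → List Int → List Int → List Bool → Option (List (List Int) × List Bool)
  | 0, _, _, _ => none
  | _ + 1, [], [], v => some ([], v)
  | fuel + 1, [], c :: cs, v =>
    (collectLoop graph fuel (c :: cs) [] v).map (fun r => ((c :: cs) :: r.1, r.2))
  | fuel + 1, node :: rest, nxt, v =>
    (graph.lookup node).bind fun adj =>
      (collectInner adj nxt v).bind fun p => collectLoop graph fuel rest p.1 p.2

-- phase 2: replay the distance writes of one recorded level ('for node in level')
def applyLevel : List Int → Int → List Int → Option (List Int)
  | [], _, d => some d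
  | node :: rest, depth, d => (PySem.List.pySet? d node depth).bind (applyLevel rest depth)

-- phase 2: 'for depth, level in enumerate(levels)'
def applyFrom : List (List Int) → Int → List Int → Option (List Int)
  | [], _, d => some d
  | lvl :: ls, depth, d => (applyLevel lvl depth d).bind (applyFrom ls (depth + 1))

def bfs_alt (graph : List (Int × List Int)) (start : Int) (visited : List Bool) (distance : List Int) : Int :=
  match PySem.List.pySet? visited start true with
  | none => 0
  | some v0 =>
    match collectLoop graph (4 * visited.length + 4) [start] [] v0 with
    | none => 0
    | some (ls, _) =>
      match applyFrom ([start] :: ls) 0 distance with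
      | none => 0
      | some dist =>
        match PySem.List.max? dist (fun x => x) with
        | none => 0
        | some m => PySem.List.count dist m

-- ===== PRECONDITION & SPEC =====
-- the set of nodes A dequeues: start plus the closure through neighbours whose visited cell is still
-- False, marking cells along the way (the fuel only bounds the closure; it is never reached)
def pvReach (graph : List (Int × List Int)) : Nat → List Bool → List Int → List Int → List Int
  | 0, _, _, s => s
  | _ + 1, _, [], s => s
  | fuel + 1, v0, u :: w, s =>
    match graph.lookup u with
    | none => pvReach graph fuel v0 w s
    | some adj =>
      let p := adj.foldl (fun (p : List Bool × List Int × List Int) i =>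
        if PySem.List.pyGet? p.1 i == some false then
          (PySem.List.pySetD p.1 i true, p.2.1 ++ [i], p.2.2 ++ [i]) else p) (v0, w, s)
      pvReach graph fuel p.1 p.2.1 p.2.2
-- Pre_ excludes exactly the raising runs of A (IndexError on visited/distance, KeyError on graph): start
-- must be a valid visited index and every dequeued node a valid distance index and graph key with all its
-- neighbours valid visited indices; duplicate-key association lists (on which A still returns) are also
-- excluded, because they denote no Python dict unambiguously.
def Pre_bfs (graph : List (Int × List Int)) (start : Int) (visited : List Bool) (distance : List Int) : Prop :=
  PySem.Raise.InRange visited.length start ∧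
  (graph.map Prod.fst).Nodup ∧
  (∀ u ∈ pvReach graph (visited.length + 2) (PySem.List.pySetD visited start true) [start] [start],
    PySem.Raise.InRange distance.length u ∧ (graph.lookup u).isSome = true ∧
    ∀ i ∈ (graph.lookup u).getD [], PySem.Raise.InRange visited.length i)
instance (graph : List (Int × List Int)) (start : Int) (visited : List Bool) (distance : List Int) : Decidable (Pre_bfs graph start visited distance) := by unfold Pre_bfs; infer_instance

def pvWitness_bfs : (List (Int × List Int)) × Int × List Bool × List Int :=
  ([(0, [1]), (1, [0])], 0, [false, false], [0, 0])

def Spec_bfs (graph : List (Int × List Int)) (start : Int) (visited : List Bool) (distance : List Int) (out : Int) : Prop := out = bfs_alt graph start visited distance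
instance (graph : List (Int × List Int)) (start : Int) (visited : List Bool) (distance : List Int) (out : Int) : Decidable (Spec_bfs graph start visited distance out) := by unfold Spec_bfs; infer_instance

-- ===== CLAIM (what is proved, stated in full; the proofs are below) =====
def Claim_equal_bfs : Prop := ∀ (graph : List (Int × List Int)) (start : Int) (visited : List Bool) (distance : List Int), Dom_bfs graph start visited distance → Pre_bfs graph start visited distance → Spec_bfs graph start visited distance (bfs graph start visited distance)

-- ===== LEMMAS AND PROOFS =====

-- setting a False cell to True removes exactly one False
theorem count_false_set (v : List Bool) : ∀ (k : Nat), v[k]? = some false →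
    (v.set k true).count false + 1 = v.count false := by
  induction v with
  | nil => intro k hk; simp at hk
  | cons a t ih =>
    intro k hk
    cases k with
    | zero =>
      simp at hk
      subst hk
      simp
    | succ k =>
      simp at hk
      have := ih k hk
      simp only [List.set_cons_succ, List.count_cons]
      omega

theorem pySet_length {α : Type} (xs : List α) (i : Int) (x : α) (v' : List α)
    (h : PySem.List.pySet? xs i x = some v') : v'.length = xs.length := by
  unfold PySem.List.pySet? at h
  cases hidx : PySem.List.pyIdx? xs.length i with
  | none => rw [hidx] at h; simp at h
  | some k => rw [hidx] at h; simp at h; rw [← h]; simp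

-- flipping one False cell: length preserved, count of False drops by one
theorem pySet_flip_false (v : List Bool) (i : Int)
    (hg : PySem.List.pyGet? v i = some false) :
    ∃ v', PySem.List.pySet? v i true = some v' ∧ v'.length = v.length ∧
      v'.count false + 1 = v.count false := by
  unfold PySem.List.pyGet? at hg
  cases hidx : PySem.List.pyIdx? v.length i with
  | none => rw [hidx] at hg; simp at hg
  | some k =>
    rw [hidx] at hg
    simp at hg
    refine ⟨v.set k true, ?_, by simp, count_false_set v k hg⟩
    unfold PySem.List.pySet?
    rw [hidx]; rfl

-- bfsInnerA relates to collectInner: same visited evolution, the queue gains the mapped next frontier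
theorem innerA_eq_collectInner (depth : Int) (adj : List Int) :
    ∀ (nxt : List Int) (base : List (Int × Int)) (visited : List Bool),
    bfsInnerA depth adj (base ++ nxt.map (fun n => (n, depth + 1))) visited =
      (collectInner adj nxt visited).map
        (fun p => (base ++ p.1.map (fun n => (n, depth + 1)), p.2)) := by
  induction adj with
  | nil => intro nxt base visited; simp [bfsInnerA, collectInner]
  | cons i rest ih =>
    intro nxt base visited
    simp only [bfsInnerA, collectInner]
    cases PySem.List.pyGet? visited i with
    | none => rfl
    | some b =>
      cases b with
      | true => simpa using ih nxt base visited
      | false =>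
        simp only [Option.bind_some, Bool.false_eq_true, if_false]
        cases PySem.List.pySet? visited i true with
        | none => rfl
        | some v' =>
          have := ih (nxt ++ [i]) base v'
          simpa [List.append_assoc] using this

-- measure bound for the collecting inner loop: each append flips a False
theorem collectInner_measure (adj : List Int) :
    ∀ (nxt nxt' : List Int) (visited visited' : List Bool),
    collectInner adj nxt visited = some (nxt', visited') →
    2 * nxt'.length + 4 * visited'.count false ≤ 2 * nxt.length + 4 * visited.count false ∧
      visited'.length = visited.length := by
  induction adj with
  | nil => intro nxt nxt' v v' h; simp [collectInner] at h; simp [h.1, h.2]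
  | cons i rest ih =>
    intro nxt nxt' v v' h
    simp only [collectInner] at h
    cases hg : PySem.List.pyGet? v i with
    | none => rw [hg] at h; simp at h
    | some b =>
      rw [hg] at h
      simp only [Option.bind_some] at h
      cases b with
      | true => exact ih nxt nxt' v v' h
      | false =>
        simp only [Bool.false_eq_true, if_false] at h
        obtain ⟨v2, hset, hlen, hcnt⟩ := pySet_flip_false v i hg
        rw [hset] at h
        simp only [Option.bind_some] at h
        have := ih (nxt ++ [i]) nxt' v2 v' h
        simp at this ⊢
        omega

-- measure bound for A's inner loop
theorem innerA_measure (depth : Int) (adj : List Int) :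
    ∀ (q q' : List (Int × Int)) (visited visited' : List Bool),
    bfsInnerA depth adj q visited = some (q', visited') →
    q'.length + 2 * visited'.count false ≤ q.length + 2 * visited.count false := by
  induction adj with
  | nil => intro q q' v v' h; simp [bfsInnerA] at h; simp [h.1, h.2]
  | cons i rest ih =>
    intro q q' v v' h
    simp only [bfsInnerA] at h
    cases hg : PySem.List.pyGet? v i with
    | none => rw [hg] at h; simp at h
    | some b =>
      rw [hg] at h
      cases b with
      | true => exact ih q q' v v' h
      | false =>
        simp only [Bool.false_eq_true, if_false] at h
        obtain ⟨v2, hset, hlen, hcnt⟩ := pySet_flip_false v i hg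
        rw [hset] at h
        have := ih (q ++ [(i, depth + 1)]) q' v2 v' h
        simp at this ⊢
        omega

-- with fuel above the measure |queue| + 2·(#False), A's loop does not see the fuel bound
theorem loopA_fuel (graph : List (Int × List Int)) :
    ∀ (f : Nat) (q : List (Int × Int)) (v : List Bool) (d : List Int),
    q.length + 2 * v.count false < f →
    bfsLoopA graph (f + 1) q v d = bfsLoopA graph f q v d := by
  intro f
  induction f with
  | zero => intro q v d h; omega
  | succ n ih =>
    intro q v d h
    cases q with
    | nil => rfl
    | cons hd rest =>
      obtain ⟨node, depth⟩ := hd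
      simp only [bfsLoopA]
      cases PySem.List.pySet? d node depth with
      | none => rfl
      | some d' =>
        dsimp only
        cases graph.lookup node with
        | none => rfl
        | some adj =>
          dsimp only
          cases hi : bfsInnerA depth adj rest v with
          | none => rfl
          | some p =>
            obtain ⟨q', v'⟩ := p
            dsimp only
            have hm := innerA_measure depth adj rest q' v v' hi
            exact ih q' v' d' (by simp at h; omega)

-- the decreasing measure of B's traversal (the last summand pays for a level transition)
def muB (front nxt : List Int) (v : List Bool) : Nat :=
  2 * (front.length + nxt.length) + 4 * v.count false +
    (if front = [] ∧ nxt ≠ [] then 1 else 0)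

-- the bridge: A's interleaved run from a mid-level state equals B's pure traversal followed by the
-- replay of the pending writes (current partial level at depth, recorded levels from depth+1 on)
theorem loop_bridge (graph : List (Int × List Int)) :
    ∀ (f : Nat) (front nxt : List Int) (depth : Int) (v : List Bool) (d : List Int),
    muB front nxt v < f →
    bfsLoopA graph f (front.map (fun n => (n, depth)) ++ nxt.map (fun n => (n, depth + 1))) v d =
      (collectLoop graph f front nxt v).bind (fun r =>
        ((applyLevel front depth d).bind (applyFrom r.1 (depth + 1))).map (fun d2 => (r.2, d2))) := by
  intro f
  induction f with
  | zero => intro front nxt depth v d h; omega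
  | succ n ih =>
    intro front nxt depth v d h
    cases front with
    | nil =>
      cases nxt with
      | nil => rfl
      | cons c cs =>
        have hA : bfsLoopA graph (n + 1) ((c :: cs).map (fun m => (m, depth + 1))) v d
            = bfsLoopA graph n ((c :: cs).map (fun m => (m, depth + 1))) v d := by
          apply loopA_fuel
          simp [muB] at h
          simp
          omega
        have hIH := ih (c :: cs) [] (depth + 1) v d (by simp [muB] at h ⊢; omega)
        simp only [List.map_nil, List.nil_append] at hIH ⊢
        show bfsLoopA graph (n + 1) ((c :: cs).map (fun m => (m, depth + 1))) v d = _
        rw [hA]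
        simp only [List.append_nil] at hIH
        rw [hIH]
        simp only [collectLoop, Option.bind_map, Option.map_bind]
        cases collectLoop graph n (c :: cs) [] v with
        | none => rfl
        | some r =>
          simp [applyLevel, applyFrom]
    | cons node rest =>
      simp only [bfsLoopA, collectLoop, List.map_cons, List.cons_append, applyLevel]
      cases hset : PySem.List.pySet? d node depth with
      | none =>
        simp only [Option.bind_none]
        cases (graph.lookup node).bind fun adj =>
            (collectInner adj nxt v).bind fun p => collectLoop graph n rest p.1 p.2 with
        | none => rfl
        | some r => rfl
      | some d' =>
        simp only [Option.bind_some]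
        cases graph.lookup node with
        | none => rfl
        | some adj =>
          simp only [Option.bind_some]
          rw [innerA_eq_collectInner]
          cases hB : collectInner adj nxt v with
          | none => rfl
          | some p =>
            obtain ⟨nxt', v'⟩ := p
            simp only [Option.map_some, Option.bind_some]
            have hm := collectInner_measure adj nxt nxt' v v' hB
            exact ih rest nxt' depth v' d' (by
              have hub : muB rest nxt' v' ≤ 2 * (rest.length + nxt'.length) + 4 * v'.count false + 1 := by
                unfold muB; split <;> omega
              simp [muB] at h
              omega)

-- ===== VERDICT (by name: the statement is the Claim_ definition above) =====
theorem bfs_spec : Claim_equal_bfs := by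
  intro graph start visited distance _ _
  unfold Spec_bfs bfs bfs_alt
  cases hs : PySem.List.pySet? visited start true with
  | none => rfl
  | some v0 =>
    dsimp only
    have hlen := pySet_length visited start true v0 hs
    have hcnt : v0.count false ≤ v0.length := List.count_le_length
    have hb := loop_bridge graph (4 * visited.length + 4) [start] [] 0 v0 distance
      (by simp [muB]; omega)
    simp only [List.map_cons, List.map_nil, List.append_nil] at hb
    rw [hb]
    cases collectLoop graph (4 * visited.length + 4) [start] [] v0 with
    | none => rfl
    | some r =>
      obtain ⟨ls, v'⟩ := r
      simp only [Option.bind_some, applyFrom, applyLevel, Option.bind_assoc]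
      cases PySem.List.pySet? distance start 0 with
      | none => rfl
      | some d1 =>
        simp only [Option.bind_some]
        cases applyFrom ls (0 + 1) d1 with
        | none => rfl
        | some dist => rfl
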